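-- pv_equiv track=rewrite | github.com/kimSooHyun950921/algoritm | soohyun/python/baekjoon/0630/1339/2.py | decide_number
-- ===== SOURCE A (Python) =====
-- def decide_number(alpha_dict):
--     alpha_num = dict()
--     salpha = dict(sorted(alpha_dict.items(), key=lambda item: item[1], reverse=True))
--     number = 9
--     for key in salpha.keys():
--         alpha_num[key] = number
--         number -= 1
--     return alpha_num
-- ===== SOURCE B (Python) =====
-- def decide_number(alpha_dict):
--     items = list(alpha_dict.items())
--     result = {}
--     number = 9
--     while items:
--         best = items[0]
--         for it in items[1:]:
--             if it[1] > best[1]: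
--                 best = it
--         result[best[0]] = number
--         number -= 1
--         items.remove(best)
--     return result
-- ===== Notes on version B (the rewrite author's own statement) =====
-- stated objective: alternative
-- what changed: B replaces A's sort-then-enumerate (sort all items by value descending, then hand out 9,8,... in one pass) by repeated selection: it scans the remaining items for the first item of maximal value, assigns it the current number, removes it, and repeats.
import Mathlib
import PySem

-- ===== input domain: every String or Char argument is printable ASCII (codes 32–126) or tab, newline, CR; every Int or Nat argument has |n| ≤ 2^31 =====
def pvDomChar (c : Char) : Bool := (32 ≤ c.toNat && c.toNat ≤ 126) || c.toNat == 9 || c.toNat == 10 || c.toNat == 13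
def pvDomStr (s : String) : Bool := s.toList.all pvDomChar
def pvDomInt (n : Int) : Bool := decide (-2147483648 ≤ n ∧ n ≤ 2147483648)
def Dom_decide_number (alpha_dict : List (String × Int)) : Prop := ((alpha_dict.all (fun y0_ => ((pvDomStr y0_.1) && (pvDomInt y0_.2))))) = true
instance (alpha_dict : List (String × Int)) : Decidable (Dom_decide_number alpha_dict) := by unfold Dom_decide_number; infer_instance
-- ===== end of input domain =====

-- B replaces the sort-then-enumerate of A by repeated first-maximum selection (selection order);
-- alternative algorithm, same result. The dict parameter is modelled as PySem.Dict.ofList of the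
-- association list (Python's dict collapses duplicate keys before either function runs).

-- ===== PORT A =====
-- dict(sorted(alpha_dict.items(), key=lambda item: item[1], reverse=True)); then assign 9,8,… in key order.
def decide_number (alpha_dict : List (String × Int)) : List (String × Int) :=
  let salpha := PySem.Dict.ofList
    (PySem.List.sorted (PySem.Dict.ofList alpha_dict).items (fun item => item.2) true)
  let res := salpha.keys.foldl
    (fun (st : PySem.Dict String Int × Int) key => (st.1.insert key st.2, st.2 - 1))
    ((PySem.Dict.empty : PySem.Dict String Int), (9 : Int))
  res.1.items

-- ===== PORT B =====
-- needed by pvSelect's termination proof: the running maximum is one of the scanned items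
def pvBestOf (x : String × Int) (rest : List (String × Int)) : String × Int :=
  rest.foldl (fun b it => if b.2 < it.2 then it else b) x

theorem pvBest_mem (rest : List (String × Int)) (x : String × Int) :
    pvBestOf x rest ∈ x :: rest := by
  unfold pvBestOf
  induction rest generalizing x with
  | nil => simp
  | cons y t ih =>
    simp only [List.foldl_cons]
    by_cases hxy : x.2 < y.2
    · rw [if_pos hxy]
      rcases List.mem_cons.mp (ih y) with h | h <;> simp [h]
    · rw [if_neg hxy]
      rcases List.mem_cons.mp (ih x) with h | h <;> simp [h]

-- while items: best = items[0]; linear scan keeps the FIRST item of maximal value ('>' moves best);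
-- result[best[0]] = number appends a fresh key; items.remove(best) = erase of a present element.
def pvSelect (items : List (String × Int)) (number : Int) : List (String × Int) :=
  match items with
  | [] => []
  | x :: rest =>
    ((pvBestOf x rest).1, number) :: pvSelect ((x :: rest).erase (pvBestOf x rest)) (number - 1)
termination_by items.length
decreasing_by
  have h := List.length_erase_of_mem (pvBest_mem rest x)
  simp only [h, List.length_cons]
  omega

def decide_number_alt (alpha_dict : List (String × Int)) : List (String × Int) :=
  pvSelect (PySem.Dict.ofList alpha_dict).items 9

-- ===== PRECONDITION & SPEC =====
def Spec_decide_number (alpha_dict : List (String × Int)) (out : List (String × Int)) : Prop := out = decide_number_alt alpha_dict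
instance (alpha_dict : List (String × Int)) (out : List (String × Int)) : Decidable (Spec_decide_number alpha_dict out) := by unfold Spec_decide_number; infer_instance

-- ===== CLAIM (what is proved, stated in full; the proofs are below) =====
def Claim_equal_decide_number : Prop := ∀ (alpha_dict : List (String × Int)), Dom_decide_number alpha_dict → Spec_decide_number alpha_dict (decide_number alpha_dict)

-- ===== LEMMAS AND PROOFS =====

-- descending-by-value order, ties broken by a rank (original position)
def pvR (rank : String × Int → Nat) (a b : String × Int) : Prop :=
  b.2 < a.2 ∨ (a.2 = b.2 ∧ rank a ≤ rank b)

-- assign number, number-1, … to the first components of a list of pairs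
def pvAssign : List (String × Int) → Int → List (String × Int)
  | [], _ => []
  | p :: t, n => (p.1, n) :: pvAssign t (n - 1)

-- same, over a key list
def pvAssignK : List String → Int → List (String × Int)
  | [], _ => []
  | k :: t, n => (k, n) :: pvAssignK t (n - 1)

theorem pvAssignK_map : ∀ (S : List (String × Int)) (n : Int),
    pvAssignK (S.map Prod.fst) n = pvAssign S n := by
  intro S; induction S with
  | nil => intro n; rfl
  | cons p t ih => intro n; simp [pvAssignK, pvAssign, ih]

theorem pvItems_ofList (S : List (String × Int)) (h : (S.map Prod.fst).Nodup) :
    (PySem.Dict.ofList S).items = S := by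
  have := PySem.Dict.items_foldl_insert_fresh S Prod.fst Prod.snd PySem.Dict.empty
    (by intro a _; simp) h
  simpa [PySem.Dict.ofList, PySem.Dict.update] using this

theorem pvIdx_pairwise (ys : List (String × Int)) (h : ys.Nodup) :
    ys.Pairwise (fun a b => ys.idxOf a < ys.idxOf b) := by
  rw [List.pairwise_iff_getElem]
  intro i j hi hj hij
  rw [List.Nodup.idxOf_getElem h i hi, List.Nodup.idxOf_getElem h j hj]
  exact hij

theorem pvInsertBy_pairwise {S : String × Int → String × Int → Prop}
    (before : String × Int → String × Int → Bool) (x : String × Int) :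
    ∀ (l : List (String × Int)), l.Pairwise S →
    (∀ y ∈ l, before x y = false → S y x) →
    (∀ y ∈ l, before x y = true → S x y) →
    (∀ y ∈ l, ∀ z ∈ l, before x y = true → S y z → before x z = true) →
    (PySem.List.insertBy before x l).Pairwise S := by
  intro l
  induction l with
  | nil => intro _ _ _ _; simp [PySem.List.insertBy]
  | cons y t ih =>
    intro hp hf ht hmono
    by_cases hxy : before x y = true
    · simp only [PySem.List.insertBy, hxy, if_true]
      constructor
      · intro z hz
        rcases List.mem_cons.mp hz with rfl | hz
        · exact ht z (by simp) hxy
        · have hyz : S y z := (List.pairwise_cons.mp hp).1 z hz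
          exact ht z (by simp [hz]) (hmono y (by simp) z (by simp [hz]) hxy hyz)
      · exact hp
    · have hxy' : before x y = false := by simpa using hxy
      have step : PySem.List.insertBy before x (y :: t) = y :: PySem.List.insertBy before x t := by
        simp [PySem.List.insertBy, hxy']
      rw [step]
      constructor
      · intro z hz
        rcases (PySem.List.mem_insertBy before x z t).mp hz with hzx | hz
        · subst hzx; exact hf y (by simp) hxy'
        · exact (List.pairwise_cons.mp hp).1 z hz
      · exact ih (List.pairwise_cons.mp hp).2
          (fun y' h1 h2 => hf y' (by simp [h1]) h2)
          (fun y' h1 h2 => ht y' (by simp [h1]) h2)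
          (fun a ha b hb hab hSab => hmono a (by simp [ha]) b (by simp [hb]) hab hSab)

theorem pvSorted_stable (rank : String × Int → Nat) (ys : List (String × Int)) :
    ys.Pairwise (fun a b => rank a < rank b) →
    (PySem.List.sorted ys (fun item => item.2) true).Pairwise (pvR rank) := by
  induction ys using List.reverseRecOn with
  | nil => intro _; simp [PySem.List.sorted]
  | append_singleton l x ih =>
    intro hp
    rcases List.pairwise_append.mp hp with ⟨h1, _, h12⟩
    have hx : ∀ y ∈ l, rank y < rank x := fun y hy => h12 y hy x (by simp)
    have hsorted_eq : PySem.List.sorted (l ++ [x]) (fun item => item.2) true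
        = PySem.List.insertBy (fun a b => decide (b.2 < a.2)) x
            (PySem.List.sorted l (fun item => item.2) true) := by
      rw [PySem.List.sorted_rev_eq_foldl_insertBy, PySem.List.sorted_rev_eq_foldl_insertBy,
        List.foldl_append]
      rfl
    rw [hsorted_eq]
    apply pvInsertBy_pairwise _ x _ (ih h1)
    · intro y hy hfalse
      have hyl : y ∈ l := (PySem.List.mem_sorted l (fun item => item.2) true y).mp hy
      have hnlt : ¬ (y.2 < x.2) := by simpa using hfalse
      rcases lt_or_eq_of_le (not_lt.mp hnlt) with hlt | heq
      · exact Or.inl hlt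
      · exact Or.inr ⟨heq.symm, (hx y hyl).le⟩
    · intro y _ htrue
      exact Or.inl (by simpa using htrue)
    · intro y _ z _ htrue hSyz
      have hyx : y.2 < x.2 := by simpa using htrue
      have hzy : z.2 ≤ y.2 := by
        rcases hSyz with h | h
        · exact h.le
        · exact h.1.ge
      simp only [decide_eq_true_eq]
      omega

theorem pvBest_split (rest : List (String × Int)) (x : String × Int) :
    ∃ l₁ l₂, x :: rest = l₁ ++ (pvBestOf x rest) :: l₂ ∧
      (∀ y ∈ l₁, y.2 < (pvBestOf x rest).2) ∧
      (∀ y ∈ x :: rest, y.2 ≤ (pvBestOf x rest).2) := by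
  induction rest generalizing x with
  | nil => exact ⟨[], [], rfl, by simp, by simp [pvBestOf]⟩
  | cons y t ih =>
    have hstep : pvBestOf x (y :: t) = pvBestOf (if x.2 < y.2 then y else x) t := rfl
    by_cases hxy : x.2 < y.2
    · obtain ⟨l₁, l₂, heq, hlt, hle⟩ := ih y
      have hb : pvBestOf x (y :: t) = pvBestOf y t := by rw [hstep, if_pos hxy]
      have hyb : y.2 ≤ (pvBestOf y t).2 := hle y (by simp)
      refine ⟨x :: l₁, l₂, ?_, ?_, ?_⟩
      · rw [hb, List.cons_append, ← heq]
      · intro z hz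
        rw [hb]
        rcases List.mem_cons.mp hz with rfl | hz
        · exact lt_of_lt_of_le hxy hyb
        · exact hlt z hz
      · intro z hz
        rw [hb]
        rcases List.mem_cons.mp hz with rfl | hz
        · exact (lt_of_lt_of_le hxy hyb).le
        · exact hle z hz
    · obtain ⟨l₁, l₂, heq, hlt, hle⟩ := ih x
      have hb : pvBestOf x (y :: t) = pvBestOf x t := by rw [hstep, if_neg hxy]
      have hyx : y.2 ≤ x.2 := not_lt.mp hxy
      cases l₁ with
      | nil =>
        simp only [List.nil_append, List.cons.injEq] at heq
        obtain ⟨hbx, hl₂⟩ := heq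
        refine ⟨[], y :: t, ?_, by simp, ?_⟩
        · rw [hb, ← hbx]; rfl
        · intro z hz
          rw [hb, ← hbx]
          rcases List.mem_cons.mp hz with rfl | hz
          · exact le_refl _
          · rcases List.mem_cons.mp hz with rfl | hz
            · exact hyx
            · have := hle z (by simp [hz])
              rwa [← hbx] at this
      | cons a l₁' =>
        simp only [List.cons_append, List.cons.injEq] at heq
        obtain ⟨hax, ht⟩ := heq
        subst hax
        have hxlt : x.2 < (pvBestOf x t).2 := hlt x (by simp)
        refine ⟨x :: y :: l₁', l₂, ?_, ?_, ?_⟩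
        · rw [hb, List.cons_append, List.cons_append, ← ht]
        · intro z hz
          rw [hb]
          rcases List.mem_cons.mp hz with rfl | hz
          · exact hxlt
          · rcases List.mem_cons.mp hz with rfl | hz
            · exact lt_of_le_of_lt hyx hxlt
            · exact hlt z (by simp [hz])
        · intro z hz
          rw [hb]
          rcases List.mem_cons.mp hz with rfl | hz
          · exact hle z (by simp)
          · rcases List.mem_cons.mp hz with rfl | hz
            · exact le_trans hyx (hle _ (by simp))
            · exact hle z (by simp [hz])

theorem pvPop (x : String × Int) (rest : List (String × Int))
    (hnd : (x :: rest).Nodup) :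
    PySem.List.sorted (x :: rest) (fun item => item.2) true
      = (pvBestOf x rest)
        :: PySem.List.sorted ((x :: rest).erase (pvBestOf x rest)) (fun item => item.2) true := by
  obtain ⟨l₁, l₂, heq, hlt, hle⟩ := pvBest_split rest x
  have hmem : pvBestOf x rest ∈ x :: rest := pvBest_mem rest x
  have hnd2 : (l₁ ++ pvBestOf x rest :: l₂).Nodup := heq ▸ hnd
  have hdisj := (List.nodup_append.mp hnd2).2.2
  have hbnl₁ : pvBestOf x rest ∉ l₁ := fun hin => (hdisj _ hin _ (by simp)) rfl
  apply List.Perm.eq_of_pairwise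
    (le := pvR (fun p => (x :: rest).idxOf p)) ?_ ?_ ?_ ?_
  · -- antisymmetry on members
    intro a b ha hb hab hba
    have ha' : a ∈ x :: rest :=
      (PySem.List.mem_sorted (x :: rest) (fun item => item.2) true a).mp ha
    have hb' : b ∈ x :: rest := by
      rcases List.mem_cons.mp hb with rfl | hb
      · exact hmem
      · exact List.mem_of_mem_erase
          ((PySem.List.mem_sorted _ (fun item => item.2) true b).mp hb)
    rcases hab with h | ⟨he, hr⟩ <;> rcases hba with h' | ⟨he', hr'⟩
    · omega
    · omega
    · omega
    · have hidx : (x :: rest).idxOf a = (x :: rest).idxOf b := le_antisymm hr hr'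
      have hia : (x :: rest).idxOf a < (x :: rest).length := List.idxOf_lt_length_of_mem ha'
      have hib : (x :: rest).idxOf b < (x :: rest).length := List.idxOf_lt_length_of_mem hb'
      rw [← List.getElem_idxOf hia, ← List.getElem_idxOf hib]
      congr 1
  · exact pvSorted_stable _ _ (pvIdx_pairwise _ hnd)
  · constructor
    · intro z hz
      have hz' : z ∈ (x :: rest).erase (pvBestOf x rest) :=
        (PySem.List.mem_sorted _ (fun item => item.2) true z).mp hz
      obtain ⟨hzb, hzmem⟩ := (List.Nodup.mem_erase_iff hnd).mp hz'
      have hzle : z.2 ≤ (pvBestOf x rest).2 := hle z hzmem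
      rcases lt_or_eq_of_le hzle with hltz | heqz
      · exact Or.inl hltz
      · refine Or.inr ⟨heqz.symm, ?_⟩
        have hznl₁ : z ∉ l₁ := fun hin => absurd heqz (by have := hlt z hin; omega)
        have hzl₂ : z ∈ l₂ := by
          have : z ∈ l₁ ++ pvBestOf x rest :: l₂ := heq ▸ hzmem
          rcases List.mem_append.mp this with h | h
          · exact absurd h hznl₁
          · rcases List.mem_cons.mp h with rfl | h
            · exact absurd rfl hzb
            · exact h
        rw [heq]
        show List.idxOf (pvBestOf x rest) (l₁ ++ pvBestOf x rest :: l₂)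
          ≤ List.idxOf z (l₁ ++ pvBestOf x rest :: l₂)
        rw [List.idxOf_append, List.idxOf_append]
        simp [hbnl₁, hznl₁, List.idxOf_cons_self]
    · exact pvSorted_stable _ _
        (List.Pairwise.sublist (List.erase_sublist) (pvIdx_pairwise _ hnd))
  · have h1 := PySem.List.sorted_perm (x :: rest) (fun item => item.2) true
    have h2 : (x :: rest).Perm (pvBestOf x rest :: (x :: rest).erase (pvBestOf x rest)) :=
      List.perm_cons_erase hmem
    have h3 : (pvBestOf x rest
        :: PySem.List.sorted ((x :: rest).erase (pvBestOf x rest)) (fun item => item.2) true).Perm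
        (pvBestOf x rest :: (x :: rest).erase (pvBestOf x rest)) :=
      (PySem.List.sorted_perm ((x :: rest).erase (pvBestOf x rest))
        (fun item : String × Int => item.2) true).cons (pvBestOf x rest)
    exact h1.trans (h2.trans h3.symm)

theorem pvSelect_eq : ∀ (m : Nat) (ys : List (String × Int)), ys.length ≤ m → ys.Nodup →
    ∀ (n : Int), pvSelect ys n = pvAssign (PySem.List.sorted ys (fun item => item.2) true) n := by
  intro m
  induction m with
  | zero =>
    intro ys hlen _ n
    have hnil : ys = [] := List.eq_nil_of_length_eq_zero (Nat.le_zero.mp hlen)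
    subst hnil
    simp [pvSelect, PySem.List.sorted, pvAssign]
  | succ m ih =>
    intro ys hlen hnd n
    cases ys with
    | nil => simp [pvSelect, PySem.List.sorted, pvAssign]
    | cons x rest =>
      rw [pvSelect, pvPop x rest hnd]
      have hlen' : ((x :: rest).erase (pvBestOf x rest)).length ≤ m := by
        have := List.length_erase_of_mem (pvBest_mem rest x)
        simp only [this, List.length_cons]
        simp only [List.length_cons] at hlen
        omega
      rw [ih _ hlen' (List.Nodup.erase _ hnd) (n - 1)]
      simp [pvAssign]

theorem pvFoldA : ∀ (ks : List String) (d : PySem.Dict String Int) (n : Int),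
    (∀ k ∈ ks, d.contains k = false) → ks.Nodup →
    ((ks.foldl (fun (st : PySem.Dict String Int × Int) key => (st.1.insert key st.2, st.2 - 1)) (d, n)).1).items
      = d.items ++ pvAssignK ks n := by
  intro ks
  induction ks with
  | nil => intro d n _ _; simp [pvAssignK]
  | cons k t ih =>
    intro d n hfresh hnd
    simp only [List.foldl_cons]
    rw [ih (d.insert k n) (n - 1)
      (by
        intro k' hk'
        rw [PySem.Dict.contains_insert]
        have hne : k' ≠ k := by
          rintro rfl; exact (List.nodup_cons.mp hnd).1 hk'
        simp [hne, hfresh k' (by simp [hk'])])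
      (List.nodup_cons.mp hnd).2]
    rw [PySem.Dict.items_insert_of_not_contains d n (hfresh k (by simp))]
    simp [pvAssignK]

-- ===== VERDICT (by name: the statement is the Claim_ definition above) =====
theorem decide_number_spec : Claim_equal_decide_number := by
  intro xs _
  unfold Spec_decide_number decide_number decide_number_alt
  dsimp only
  set ys := (PySem.Dict.ofList xs).items with hys
  have hknd : (ys.map Prod.fst).Nodup := by
    have := PySem.Dict.nodup_keys_ofList xs
    simpa [PySem.Dict.keys, hys] using this
  have hnd : ys.Nodup := hknd.of_map
  set S := PySem.List.sorted ys (fun item => item.2) true with hS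
  have hSperm : S.Perm ys := PySem.List.sorted_perm ys (fun item => item.2) true
  have hSk : (S.map Prod.fst).Nodup := ((hSperm.map Prod.fst).nodup_iff).mpr hknd
  have hA : (PySem.Dict.ofList S).keys = S.map Prod.fst := by
    simp [PySem.Dict.keys, pvItems_ofList S hSk]
  rw [hA, pvFoldA (S.map Prod.fst) PySem.Dict.empty 9 (by intro k _; simp) hSk]
  rw [pvSelect_eq ys.length ys le_rfl hnd 9, ← hS, pvAssignK_map]
  simp [PySem.Dict.empty]
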